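-- pv_equiv track=rewrite | github.com/LaurensVanDamme/STL-monitoring | test.py | getSamplingPointsIntersection
-- ===== SOURCE A (Python) =====
-- def getSamplingPointsIntersection(s1, s2):
--     loop_range = len(s1)
--     i_1 = 0
--     i_2 = 0
--     s1_pop = []
--     s2_pop = []
--     while i_1 < len(s1[0]) and i_2 < len(s2[0]):
--         if s1[0][i_1] == s2[0][i_2]:
--             i_1 += 1
--             i_2 += 1
--         elif s1[0][i_1] < s2[0][i_2]:
--             s1_pop.append(i_1)
--             i_1 += 1
--         elif s1[0][i_1] > s2[0][i_2]:
--             s2_pop.append(i_2)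
--             i_2 += 1
--     for i in range(i_1, len(s1[0])):
--         s1_pop.append(i)
--     for i in range(i_2, len(s2[0])):
--         s2_pop.append(i)
--     for index in reversed(s1_pop):
--         for i in range(loop_range):
--             s1[i].pop(index)
--     for index in reversed(s2_pop):
--         for i in range(loop_range):
--             s2[i].pop(index)
--     return s1, s2
-- ===== SOURCE B (Python) =====
-- def getSamplingPointsIntersection(s1, s2):
--     # Rebuild of each row in one filter pass over two drop-index sets,
--     # instead of repeated list.pop shifts; rows are left alone when nothing is dropped.
--     t1, t2 = s1[0], s2[0]
--     drop1, drop2 = set(), set()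
--     i = j = 0
--     while i < len(t1) and j < len(t2):
--         if t1[i] == t2[j]:
--             i += 1
--             j += 1
--         elif t1[i] < t2[j]:
--             drop1.add(i)
--             i += 1
--         else:
--             drop2.add(j)
--             j += 1
--     drop1.update(range(i, len(t1)))
--     drop2.update(range(j, len(t2)))
--     if drop1:
--         for i in range(len(s1)):
--             s1[i] = [x for k, x in enumerate(s1[i]) if k not in drop1]
--     if drop2:
--         for i in range(len(s1)):
--             s2[i] = [x for k, x in enumerate(s2[i]) if k not in drop2]
--     return s1, s2
-- ===== Notes on version B (the rewrite author's own statement) =====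
-- stated objective: alternative
-- what changed: A removes unmatched timestamps by repeatedly calling list.pop(index) on every row (one full shift per popped index per row); B collects the unmatched indices in two sets during the same two-pointer merge and rebuilds each row in a single filter pass.
-- outside the precondition, e.g. on getSamplingPointsIntersection([[1], [7]], [[1]]): A returns ([[1], [7]], [[1]]), B returns ([[1], [7]], [[1]]); on getSamplingPointsIntersection([[1, 2], [5]], [[2], [7]]): A returns ([[2], []], [[2], [7]]), B returns ([[2], []], [[2], [7]])
import Mathlib
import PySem

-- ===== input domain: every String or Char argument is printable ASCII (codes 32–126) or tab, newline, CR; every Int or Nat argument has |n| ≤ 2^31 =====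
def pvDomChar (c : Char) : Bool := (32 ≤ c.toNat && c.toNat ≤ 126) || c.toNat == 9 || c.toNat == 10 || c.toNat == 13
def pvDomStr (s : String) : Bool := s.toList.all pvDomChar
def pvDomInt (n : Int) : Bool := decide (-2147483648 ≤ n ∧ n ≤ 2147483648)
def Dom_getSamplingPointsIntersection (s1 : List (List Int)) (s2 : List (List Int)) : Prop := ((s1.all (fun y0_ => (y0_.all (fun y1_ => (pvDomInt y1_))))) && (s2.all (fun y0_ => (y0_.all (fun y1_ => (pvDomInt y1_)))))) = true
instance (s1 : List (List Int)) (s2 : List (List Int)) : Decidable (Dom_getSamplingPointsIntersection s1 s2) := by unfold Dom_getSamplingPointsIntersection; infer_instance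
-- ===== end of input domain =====

-- B replaces A's repeated list.pop passes by a one-pass rebuild of each row (drop-index sets
-- + single filter per row); return values agree on Pre_, and both versions mutate/rebuild the
-- caller's outer lists in Python (the proof is about the return value only).

-- ===== PORT A =====
-- Python list.pop(idx): exact for 0 ≤ idx < len(l); Pre_ keeps every popped index in range.
def pvPopAt (l : List Int) (idx : Nat) : List Int := l.take idx ++ l.drop (idx + 1)

-- 'for i in range(loop_range): rows[i].pop(index)' — one pop pass over the first lr rows
-- (indices are the nonnegative loop counters, ported as Nat; enumerate via List.zipIdx).
def pvPopRows (rows : List (List Int)) (lr : Nat) (idx : Nat) : List (List Int) :=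
  rows.zipIdx.map (fun q => if q.2 < lr then pvPopAt q.1 idx else q.1)

-- A's while loop: two cursors over s1[0], s2[0], appending unmatched indices to the pop lists.
-- The final 'else' is Python's 'elif s1[0][i_1] > s2[0][i_2]', the only remaining case on ints.
-- The loop is ported with a fuel counter: every iteration advances i1 + i2, so fuel
-- len(t1) + len(t2) is never exhausted before the while-guard stops the loop.
def pvMergeA (t1 t2 : List Int) : Nat → Nat → Nat → List Nat → List Nat →
    (List Nat × List Nat) × (Nat × Nat)
  | 0, i1, i2, p1, p2 => ((p1, p2), (i1, i2))
  | fuel + 1, i1, i2, p1, p2 =>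
    if h : i1 < t1.length ∧ i2 < t2.length then
      if t1[i1] = t2[i2] then pvMergeA t1 t2 fuel (i1 + 1) (i2 + 1) p1 p2
      else if t1[i1] < t2[i2] then pvMergeA t1 t2 fuel (i1 + 1) i2 (p1 ++ [i1]) p2
      else pvMergeA t1 t2 fuel i1 (i2 + 1) p1 (p2 ++ [i2])
    else ((p1, p2), (i1, i2))

def getSamplingPointsIntersection (s1 : List (List Int)) (s2 : List (List Int)) :
    List (List Int) × List (List Int) :=
  let loopRange := s1.length
  let t1 := s1.headD []          -- s1[0]; IndexError on [] is excluded by Pre_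
  let t2 := s2.headD []          -- s2[0]
  let m := pvMergeA t1 t2 (t1.length + t2.length) 0 0 [] []
  -- the two trailing 'for i in range(i_k, len(...))' append loops (range(a,b) = range' a (b-a))
  let s1pop := m.1.1 ++ List.range' m.2.1 (t1.length - m.2.1)
  let s2pop := m.1.2 ++ List.range' m.2.2 (t2.length - m.2.2)
  let s1' := s1pop.reverse.foldl (fun rows idx => pvPopRows rows loopRange idx) s1
  let s2' := s2pop.reverse.foldl (fun rows idx => pvPopRows rows loopRange idx) s2
  (s1', s2')

-- ===== PORT B =====
-- B's merge collects the indices of unmatched timestamps into two sets (PySem.Set = Python set);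
-- same fuel-counted while loop as in port A (the guard, not the fuel, ends the loop).
def pvMergeB (t1 t2 : List Int) : Nat → Nat → Nat → PySem.Set Nat → PySem.Set Nat →
    (PySem.Set Nat × PySem.Set Nat) × (Nat × Nat)
  | 0, i, j, d1, d2 => ((d1, d2), (i, j))
  | fuel + 1, i, j, d1, d2 =>
    if h : i < t1.length ∧ j < t2.length then
      if t1[i] = t2[j] then pvMergeB t1 t2 fuel (i + 1) (j + 1) d1 d2
      else if t1[i] < t2[j] then pvMergeB t1 t2 fuel (i + 1) j (PySem.Set.add d1 i) d2
      else pvMergeB t1 t2 fuel i (j + 1) d1 (PySem.Set.add d2 j)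
    else ((d1, d2), (i, j))

-- '[x for k, x in enumerate(row) if k not in drop]' (Nat indices via List.zipIdx)
def pvKeepRow (drop : PySem.Set Nat) (row : List Int) : List Int :=
  row.zipIdx.filterMap (fun q => if PySem.Set.contains drop q.2 then none else some q.1)

def getSamplingPointsIntersection_alt (s1 : List (List Int)) (s2 : List (List Int)) :
    List (List Int) × List (List Int) :=
  let t1 := s1.headD []          -- s1[0]
  let t2 := s2.headD []          -- s2[0]
  let m := pvMergeB t1 t2 (t1.length + t2.length) 0 0 PySem.Set.empty PySem.Set.empty
  let d1 := PySem.Set.update m.1.1 (List.range' m.2.1 (t1.length - m.2.1))  -- drop1.update(range(i, len(t1)))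
  let d2 := PySem.Set.update m.1.2 (List.range' m.2.2 (t2.length - m.2.2))
  -- 'if dropk: for i in range(len(s1)): …' — every s1 row, the first len(s1) rows of s2
  (if d1.isEmpty then s1 else s1.map (fun row => pvKeepRow d1 row),
   if d2.isEmpty then s2 else s2.zipIdx.map (fun q => if q.2 < s1.length then pvKeepRow d2 q.1 else q.1))

-- ===== PRECONDITION & SPEC =====
-- Pre_ excludes inputs on which A's indexing can raise IndexError (empty s1/s2; rows shorter
-- than the header row among s1's rows and s2's first len(s1) rows; fewer s2 rows than s1 rows,
-- where A pops from missing rows — and B's rebuild loop indexes the same missing rows).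
-- The row-length bound is conservative: it also excludes some ragged inputs whose short rows
-- happen to survive A's pops (A and B agree there; see the cited examples).
def Pre_getSamplingPointsIntersection (s1 : List (List Int)) (s2 : List (List Int)) : Prop :=
  s1 ≠ [] ∧ s2 ≠ [] ∧ s1.length ≤ s2.length ∧
  (∀ r ∈ s1, (s1.headD []).length ≤ r.length) ∧
  (∀ r ∈ s2.take s1.length, (s2.headD []).length ≤ r.length)
instance (s1 : List (List Int)) (s2 : List (List Int)) : Decidable (Pre_getSamplingPointsIntersection s1 s2) := by unfold Pre_getSamplingPointsIntersection; infer_instance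

def pvWitness_getSamplingPointsIntersection : List (List Int) × List (List Int) :=
  ([[0, 1, 3], [10, 20, 30]], [[1, 2, 3], [40, 50, 60]])

def Spec_getSamplingPointsIntersection (s1 : List (List Int)) (s2 : List (List Int)) (out : List (List Int) × List (List Int)) : Prop := out = getSamplingPointsIntersection_alt s1 s2
instance (s1 : List (List Int)) (s2 : List (List Int)) (out : List (List Int) × List (List Int)) : Decidable (Spec_getSamplingPointsIntersection s1 s2 out) := by unfold Spec_getSamplingPointsIntersection; infer_instance

-- ===== CLAIM (what is proved, stated in full; the proofs are below) =====
def Claim_equal_getSamplingPointsIntersection : Prop := ∀ (s1 : List (List Int)) (s2 : List (List Int)), Dom_getSamplingPointsIntersection s1 s2 → Pre_getSamplingPointsIntersection s1 s2 → Spec_getSamplingPointsIntersection s1 s2 (getSamplingPointsIntersection s1 s2)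

-- ===== LEMMAS AND PROOFS =====

-- proof-side canonical row filter: keep the elements whose index, counted from k, is not in d
def pvKeepAux (d : List Nat) (k : Nat) (r : List Int) : List Int :=
  match r with
  | [] => []
  | x :: t => if d.contains k then pvKeepAux d (k + 1) t else x :: pvKeepAux d (k + 1) t

theorem keepAux_cons_lt (d : List Nat) (m k : Nat) (r : List Int) (hm : m < k) :
    pvKeepAux (m :: d) k r = pvKeepAux d k r := by
  induction r generalizing k with
  | nil => rfl
  | cons x t ih =>
    have : (m :: d).contains k = d.contains k := by
      simp; omega
    rw [pvKeepAux, pvKeepAux, this, ih _ (by omega)]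

theorem popAt_keepAux (d : List Nat) (a k : Nat) (r : List Int)
    (ha : ∀ x ∈ d, k + a < x) (hlen : a < r.length) :
    pvPopAt (pvKeepAux d k r) a = pvKeepAux ((k + a) :: d) k r := by
  induction r generalizing a k with
  | nil => simp at hlen
  | cons x t ih =>
    have hkd : k ∉ d := fun hk => absurd (ha _ hk) (by omega)
    cases a with
    | zero =>
      simp only [Nat.add_zero]
      rw [pvKeepAux, if_neg (by simp; exact hkd)]
      rw [pvKeepAux, if_pos (by simp)]
      rw [keepAux_cons_lt d k (k + 1) t (by omega)]
      simp [pvPopAt]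
    | succ a' =>
      rw [pvKeepAux, if_neg (by simp; exact hkd)]
      rw [pvKeepAux, if_neg (by simp; exact hkd)]
      have h1 : pvPopAt (x :: pvKeepAux d (k + 1) t) (a' + 1) = x :: pvPopAt (pvKeepAux d (k + 1) t) a' := by
        simp [pvPopAt]
      rw [h1, ih a' (k + 1) (fun y hy => by have := ha y hy; omega) (by simpa using hlen)]
      have h2 : k + 1 + a' = k + (a' + 1) := by omega
      rw [h2]

theorem keepRow_eq_keepAux (d : List Nat) (r : List Int) (k : Nat) :
    (r.zipIdx k).filterMap (fun q => if PySem.Set.contains d q.2 then none else some q.1) = pvKeepAux d k r := by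
  induction r generalizing k with
  | nil => simp [pvKeepAux]
  | cons x t ih =>
    rw [List.zipIdx_cons, List.filterMap_cons, pvKeepAux]
    by_cases h : k ∈ d
    · rw [if_pos (by simp [PySem.Set.contains, h]), if_pos (by simp [h]), ih]
    · rw [if_neg (by simp [PySem.Set.contains, h]), if_neg (by simp [h]), List.cons.injEq, ih]
      exact ⟨rfl, rfl⟩

theorem keepAux_of_all_lt (d : List Nat) (k : Nat) (r : List Int) (h : ∀ x ∈ d, x < k) :
    pvKeepAux d k r = r := by
  induction r generalizing k with
  | nil => rfl
  | cons x t ih =>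
    rw [pvKeepAux, if_neg (by simp; intro hk; exact absurd (h _ hk) (by omega)),
        ih _ (fun x hx => Nat.lt_succ_of_lt (h x hx))]

theorem popFoldr_eq_keepAux (p : List Nat) (r : List Int)
    (hp : p.Pairwise (· < ·)) (hb : ∀ x ∈ p, x < r.length) :
    p.foldr (fun idx acc => pvPopAt acc idx) r = pvKeepAux p 0 r := by
  induction p with
  | nil => exact (keepAux_of_all_lt [] 0 r (by simp)).symm
  | cons a p' ih =>
    rw [List.foldr_cons, ih hp.of_cons (fun x hx => hb x (List.mem_cons_of_mem _ hx))]
    have := popAt_keepAux p' a 0 r (fun x hx => by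
      simpa using (List.pairwise_cons.mp hp).1 x hx) (hb a (List.mem_cons_self))
    simpa using this

theorem update_range' (d : List Nat) (e n : Nat) (h : ∀ x ∈ d, x < e) :
    PySem.Set.update d (List.range' e n) = d ++ List.range' e n := by
  induction n generalizing d e with
  | zero => simp [PySem.Set.update]
  | succ n ih =>
    rw [List.range'_succ]
    have hadd : PySem.Set.add d e = d ++ [e] := by
      rw [PySem.Set.add, if_neg]
      simp
      intro hk; exact absurd (h _ hk) (by omega)
    calc PySem.Set.update d (e :: List.range' (e+1) n)
        = PySem.Set.update (PySem.Set.add d e) (List.range' (e+1) n) := by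
          simp [PySem.Set.update]
      _ = (d ++ [e]) ++ List.range' (e+1) n := by
          rw [hadd, ih (d ++ [e]) (e+1) (by intro x hx; simp at hx; rcases hx with h1 | h2 <;> [exact Nat.lt_succ_of_lt (h x h1); omega])]
      _ = d ++ (e :: List.range' (e+1) n) := by simp

theorem mergeB_eq_mergeA (t1 t2 : List Int) (fuel : Nat) : ∀ (i1 i2 : Nat) (d1 d2 : List Nat),
    (∀ x ∈ d1, x < i1) → (∀ x ∈ d2, x < i2) →
    pvMergeB t1 t2 fuel i1 i2 d1 d2 = pvMergeA t1 t2 fuel i1 i2 d1 d2 := by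
  induction fuel with
  | zero => intro i1 i2 d1 d2 _ _; rfl
  | succ fuel ih =>
    intro i1 i2 d1 d2 h1 h2
    rw [pvMergeB, pvMergeA]
    by_cases h : i1 < t1.length ∧ i2 < t2.length
    · rw [dif_pos h, dif_pos h]
      by_cases heq : t1[i1] = t2[i2]
      · rw [if_pos heq, if_pos heq]
        exact ih _ _ _ _ (fun x hx => by have := h1 x hx; omega) (fun x hx => by have := h2 x hx; omega)
      · rw [if_neg heq, if_neg heq]
        by_cases hlt : t1[i1] < t2[i2]
        · rw [if_pos hlt, if_pos hlt]
          have hadd : PySem.Set.add d1 i1 = d1 ++ [i1] := by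
            rw [PySem.Set.add, if_neg (by simp [PySem.Set.contains]; intro hk; exact absurd (h1 _ hk) (by omega))]
          rw [hadd]
          exact ih _ _ _ _ (fun x hx => by simp at hx; rcases hx with h' | h' <;> [exact Nat.lt_succ_of_lt (h1 x h'); omega]) h2
        · rw [if_neg hlt, if_neg hlt]
          have hadd : PySem.Set.add d2 i2 = d2 ++ [i2] := by
            rw [PySem.Set.add, if_neg (by simp [PySem.Set.contains]; intro hk; exact absurd (h2 _ hk) (by omega))]
          rw [hadd]
          exact ih _ _ _ _ h1 (fun x hx => by simp at hx; rcases hx with h' | h' <;> [exact Nat.lt_succ_of_lt (h2 x h'); omega])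
    · rw [dif_neg h, dif_neg h]

theorem mergeA_inv (t1 t2 : List Int) (fuel : Nat) : ∀ (i1 i2 : Nat) (p1 p2 : List Nat),
    i1 ≤ t1.length → i2 ≤ t2.length →
    (∀ x ∈ p1, x < i1) → p1.Pairwise (· < ·) →
    (∀ x ∈ p2, x < i2) → p2.Pairwise (· < ·) →
    (∀ x ∈ (pvMergeA t1 t2 fuel i1 i2 p1 p2).1.1, x < (pvMergeA t1 t2 fuel i1 i2 p1 p2).2.1) ∧
    (pvMergeA t1 t2 fuel i1 i2 p1 p2).1.1.Pairwise (· < ·) ∧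
    (pvMergeA t1 t2 fuel i1 i2 p1 p2).2.1 ≤ t1.length ∧
    (∀ x ∈ (pvMergeA t1 t2 fuel i1 i2 p1 p2).1.2, x < (pvMergeA t1 t2 fuel i1 i2 p1 p2).2.2) ∧
    (pvMergeA t1 t2 fuel i1 i2 p1 p2).1.2.Pairwise (· < ·) ∧
    (pvMergeA t1 t2 fuel i1 i2 p1 p2).2.2 ≤ t2.length := by
  induction fuel with
  | zero =>
    intro i1 i2 p1 p2 hi1 hi2 h1 hp1 h2 hp2
    exact ⟨h1, hp1, hi1, h2, hp2, hi2⟩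
  | succ fuel ih =>
    intro i1 i2 p1 p2 hi1 hi2 h1 hp1 h2 hp2
    rw [pvMergeA]
    by_cases h : i1 < t1.length ∧ i2 < t2.length
    · rw [dif_pos h]
      by_cases heq : t1[i1] = t2[i2]
      · rw [if_pos heq]
        exact ih _ _ _ _ (by omega) (by omega) (fun x hx => by have := h1 x hx; omega) hp1
          (fun x hx => by have := h2 x hx; omega) hp2
      · rw [if_neg heq]
        by_cases hlt : t1[i1] < t2[i2]
        · rw [if_pos hlt]
          refine ih _ _ _ _ (by omega) (by omega) ?_ ?_ h2 hp2
          · intro x hx; simp at hx; rcases hx with h' | h' <;> [skip; omega]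
            exact Nat.lt_succ_of_lt (h1 x h')
          · rw [List.pairwise_append]
            exact ⟨hp1, List.pairwise_singleton _ _, fun a ha b hb => by simp at hb; subst hb; exact h1 a ha⟩
        · rw [if_neg hlt]
          refine ih _ _ _ _ (by omega) (by omega) h1 hp1 ?_ ?_
          · intro x hx; simp at hx; rcases hx with h' | h' <;> [skip; omega]
            exact Nat.lt_succ_of_lt (h2 x h')
          · rw [List.pairwise_append]
            exact ⟨hp2, List.pairwise_singleton _ _, fun a ha b hb => by simp at hb; subst hb; exact h2 a ha⟩
    · rw [dif_neg h]
      exact ⟨h1, hp1, hi1, h2, hp2, hi2⟩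

theorem popRows_map_form (G : List Int → Nat → List Int) (rows : List (List Int)) (lr idx : Nat) :
    pvPopRows (rows.zipIdx.map (fun q => G q.1 q.2)) lr idx
      = rows.zipIdx.map (fun q => if q.2 < lr then pvPopAt (G q.1 q.2) idx else G q.1 q.2) := by
  apply List.ext_getElem
  · simp [pvPopRows]
  · intro i h1 h2
    simp [pvPopRows, List.getElem_zipIdx]

theorem foldr_popRows (p : List Nat) (rows : List (List Int)) (lr : Nat) :
    p.foldr (fun idx rows => pvPopRows rows lr idx) rows
      = rows.zipIdx.map (fun q => if q.2 < lr then p.foldr (fun idx r => pvPopAt r idx) q.1 else q.1) := by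
  induction p with
  | nil =>
    simp only [List.foldr_nil, ite_self]
    exact (List.zipIdx_map_fst 0 rows).symm
  | cons a p' ih =>
    rw [List.foldr_cons, ih]
    refine (popRows_map_form (fun r i => if i < lr then List.foldr (fun idx r => pvPopAt r idx) r p' else r) rows lr a).trans ?_
    refine List.map_congr_left (fun q hq => ?_)
    by_cases h : q.2 < lr <;> simp [h]

theorem pairwise_lt_range' (s n : Nat) : (List.range' s n).Pairwise (· < ·) := by
  induction n generalizing s with
  | zero => simp
  | succ n ih =>
    rw [List.range'_succ]
    exact List.pairwise_cons.mpr ⟨fun m hm => (List.mem_range'_1.mp hm).1, ih (s + 1)⟩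

theorem zipIdx_map_fst_fn (l : List (List Int)) (f : List Int → List Int) :
    l.zipIdx.map (fun q => f q.1) = l.map f := by
  calc l.zipIdx.map (fun q => f q.1) = (l.zipIdx.map Prod.fst).map f := by rw [List.map_map]; rfl
    _ = l.map f := by rw [List.zipIdx_map_fst 0 l]

theorem mem_zipIdx_facts (l : List (List Int)) (q : List Int × Nat) (hq : q ∈ l.zipIdx) :
    q.2 < l.length ∧ l[q.2]? = some q.1 := by
  have h := List.mem_zipIdx_iff_getElem?.mp hq
  exact ⟨by have := List.getElem?_eq_some_iff.mp h; exact this.1, h⟩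

-- one pop pass per dropped index over the first lr rows = one keep pass per row
theorem rows_eq (p : List Nat) (rows : List (List Int)) (lr : Nat) (hp : p.Pairwise (· < ·))
    (hb : ∀ q ∈ rows.zipIdx, q.2 < lr → (∀ x ∈ p, x < q.1.length)) :
    p.reverse.foldl (fun rows idx => pvPopRows rows lr idx) rows
      = rows.zipIdx.map (fun q => if q.2 < lr then pvKeepRow p q.1 else q.1) := by
  rw [List.foldl_reverse, foldr_popRows]
  refine List.map_congr_left (fun q hq => ?_)
  by_cases h : q.2 < lr
  · simp only [h, if_pos]
    rw [popFoldr_eq_keepAux p q.1 hp (hb q hq h), ← keepRow_eq_keepAux p q.1 0]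
    rfl
  · simp [h]

theorem ports_eq (s1 s2 : List (List Int)) (_hlen : s1.length ≤ s2.length)
    (hrow1 : ∀ r ∈ s1, (s1.headD []).length ≤ r.length)
    (hrow2 : ∀ r ∈ s2.take s1.length, (s2.headD []).length ≤ r.length) :
    getSamplingPointsIntersection s1 s2 = getSamplingPointsIntersection_alt s1 s2 := by
  have hBA : pvMergeB (s1.headD []) (s2.headD []) ((s1.headD []).length + (s2.headD []).length) 0 0 PySem.Set.empty PySem.Set.empty
      = pvMergeA (s1.headD []) (s2.headD []) ((s1.headD []).length + (s2.headD []).length) 0 0 [] [] :=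
    mergeB_eq_mergeA _ _ _ _ _ _ _ (by simp [PySem.Set.empty]) (by simp [PySem.Set.empty])
  obtain ⟨inv1, invp1, invb1, inv2, invp2, invb2⟩ :=
    mergeA_inv (s1.headD []) (s2.headD []) ((s1.headD []).length + (s2.headD []).length) 0 0 [] []
      (by omega) (by omega) (by simp) (by simp) (by simp) (by simp)
  set t1 := s1.headD [] with ht1
  set t2 := s2.headD [] with ht2
  set m := pvMergeA t1 t2 (t1.length + t2.length) 0 0 [] [] with hm
  set P1 := m.1.1 ++ List.range' m.2.1 (t1.length - m.2.1) with hP1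
  set P2 := m.1.2 ++ List.range' m.2.2 (t2.length - m.2.2) with hP2
  have hU1 : PySem.Set.update m.1.1 (List.range' m.2.1 (t1.length - m.2.1)) = P1 :=
    update_range' _ _ _ inv1
  have hU2 : PySem.Set.update m.1.2 (List.range' m.2.2 (t2.length - m.2.2)) = P2 :=
    update_range' _ _ _ inv2
  have hP1p : P1.Pairwise (· < ·) := by
    rw [hP1, List.pairwise_append]
    exact ⟨invp1, pairwise_lt_range' _ _,
      fun a ha b hb => by have := (List.mem_range'_1.mp hb).1; have := inv1 a ha; omega⟩
  have hP2p : P2.Pairwise (· < ·) := by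
    rw [hP2, List.pairwise_append]
    exact ⟨invp2, pairwise_lt_range' _ _,
      fun a ha b hb => by have := (List.mem_range'_1.mp hb).1; have := inv2 a ha; omega⟩
  have hP1b : ∀ x ∈ P1, x < t1.length := by
    intro x hx; rw [hP1, List.mem_append] at hx
    rcases hx with h | h
    · have := inv1 x h; omega
    · have := List.mem_range'_1.mp h; omega
  have hP2b : ∀ x ∈ P2, x < t2.length := by
    intro x hx; rw [hP2, List.mem_append] at hx
    rcases hx with h | h
    · have := inv2 x h; omega
    · have := List.mem_range'_1.mp h; omega
  have hkeep_nil : ∀ r : List Int, pvKeepRow ([] : List Nat) r = r := fun r =>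
    (keepRow_eq_keepAux [] r 0).trans (keepAux_of_all_lt [] 0 r (by simp))
  have hA1 : P1.reverse.foldl (fun rows idx => pvPopRows rows s1.length idx) s1
      = s1.map (fun row => pvKeepRow P1 row) := by
    rw [rows_eq P1 s1 s1.length hP1p (fun q hq _ x hx => by
      obtain ⟨hlt, hget⟩ := mem_zipIdx_facts s1 q hq
      have hmem : q.1 ∈ s1 := List.mem_of_getElem? hget
      have := hrow1 q.1 hmem
      have := hP1b x hx
      omega)]
    refine (List.map_congr_left (fun q hq => ?_)).trans (zipIdx_map_fst_fn s1 (pvKeepRow P1))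
    have := (mem_zipIdx_facts s1 q hq).1
    simp [this]
  have hA2 : P2.reverse.foldl (fun rows idx => pvPopRows rows s1.length idx) s2
      = s2.zipIdx.map (fun q => if q.2 < s1.length then pvKeepRow P2 q.1 else q.1) := by
    rw [rows_eq P2 s2 s1.length hP2p (fun q hq h2 x hx => by
      obtain ⟨hlt, hget⟩ := mem_zipIdx_facts s2 q hq
      have hq1 : (s2.take s1.length)[q.2]? = some q.1 := by
        rw [List.getElem?_take_of_lt h2]; exact hget
      have hmem : q.1 ∈ s2.take s1.length := List.mem_of_getElem? hq1
      have := hrow2 q.1 hmem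
      have := hP2b x hx
      omega)]
  show (P1.reverse.foldl (fun rows idx => pvPopRows rows s1.length idx) s1,
        P2.reverse.foldl (fun rows idx => pvPopRows rows s1.length idx) s2)
      = (if (PySem.Set.update (pvMergeB t1 t2 (t1.length + t2.length) 0 0 PySem.Set.empty PySem.Set.empty).1.1 (List.range' (pvMergeB t1 t2 (t1.length + t2.length) 0 0 PySem.Set.empty PySem.Set.empty).2.1 (t1.length - (pvMergeB t1 t2 (t1.length + t2.length) 0 0 PySem.Set.empty PySem.Set.empty).2.1))).isEmpty then s1
         else s1.map (fun row => pvKeepRow (PySem.Set.update (pvMergeB t1 t2 (t1.length + t2.length) 0 0 PySem.Set.empty PySem.Set.empty).1.1 (List.range' (pvMergeB t1 t2 (t1.length + t2.length) 0 0 PySem.Set.empty PySem.Set.empty).2.1 (t1.length - (pvMergeB t1 t2 (t1.length + t2.length) 0 0 PySem.Set.empty PySem.Set.empty).2.1))) row),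
         if (PySem.Set.update (pvMergeB t1 t2 (t1.length + t2.length) 0 0 PySem.Set.empty PySem.Set.empty).1.2 (List.range' (pvMergeB t1 t2 (t1.length + t2.length) 0 0 PySem.Set.empty PySem.Set.empty).2.2 (t2.length - (pvMergeB t1 t2 (t1.length + t2.length) 0 0 PySem.Set.empty PySem.Set.empty).2.2))).isEmpty then s2
         else s2.zipIdx.map (fun q => if q.2 < s1.length then pvKeepRow (PySem.Set.update (pvMergeB t1 t2 (t1.length + t2.length) 0 0 PySem.Set.empty PySem.Set.empty).1.2 (List.range' (pvMergeB t1 t2 (t1.length + t2.length) 0 0 PySem.Set.empty PySem.Set.empty).2.2 (t2.length - (pvMergeB t1 t2 (t1.length + t2.length) 0 0 PySem.Set.empty PySem.Set.empty).2.2))) q.1 else q.1))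
  rw [hBA, hU1, hU2, Prod.mk.injEq]
  constructor
  · by_cases hE : P1.isEmpty
    · rw [if_pos hE, hA1]
      have hnil : P1 = [] := List.isEmpty_iff.mp hE
      rw [hnil]
      exact (List.map_congr_left (fun r _ => hkeep_nil r)).trans (List.map_id s1)
    · rw [if_neg hE]; exact hA1
  · by_cases hE : P2.isEmpty
    · rw [if_pos hE, hA2]
      have hnil : P2 = [] := List.isEmpty_iff.mp hE
      rw [hnil]
      refine (List.map_congr_left (fun q _ => ?_)).trans (List.zipIdx_map_fst 0 s2)
      rw [hkeep_nil q.1, ite_self]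
    · rw [if_neg hE]; exact hA2

-- ===== VERDICT (by name: the statement is the Claim_ definition above) =====
theorem getSamplingPointsIntersection_spec : Claim_equal_getSamplingPointsIntersection := by
  intro s1 s2 _ hpre
  obtain ⟨_, _, hlen, hrow1, hrow2⟩ := hpre
  exact ports_eq s1 s2 hlen hrow1 hrow2
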